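-- pv_equiv track=rewrite | github.com/rivkms/2019_omoc_ai | code/L05/breakout/breakout_Q_test.py | to_scalar
-- ===== SOURCE A (Python) =====
-- def to_scalar(state):
--     if min(state) == 0:
--         states_in_scalar = 0 # Terminal state
--     else:
--         states_in_scalar = state[0]
--         for i in range(1, len(state)):
--             states_in_scalar = states_in_scalar * 5 + state[i]
--
--     return states_in_scalar
-- ===== SOURCE B (Python) =====
-- def to_scalar(state):
--     if min(state) == 0:
--         return 0  # Terminal state
--     total = 0
--     weight = 1
--     for d in reversed(state):
--         total += d * weight
--         weight *= 5
--     return total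
-- ===== Notes on version B (the rewrite author's own statement) =====
-- stated objective: alternative
-- what changed: Replaces Horner's forward accumulator (acc*5+digit over indices 1..n-1 starting from state[0]) with a backward pass over reversed(state) maintaining an explicit power-of-5 weight and summing digit*weight.
import Mathlib
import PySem

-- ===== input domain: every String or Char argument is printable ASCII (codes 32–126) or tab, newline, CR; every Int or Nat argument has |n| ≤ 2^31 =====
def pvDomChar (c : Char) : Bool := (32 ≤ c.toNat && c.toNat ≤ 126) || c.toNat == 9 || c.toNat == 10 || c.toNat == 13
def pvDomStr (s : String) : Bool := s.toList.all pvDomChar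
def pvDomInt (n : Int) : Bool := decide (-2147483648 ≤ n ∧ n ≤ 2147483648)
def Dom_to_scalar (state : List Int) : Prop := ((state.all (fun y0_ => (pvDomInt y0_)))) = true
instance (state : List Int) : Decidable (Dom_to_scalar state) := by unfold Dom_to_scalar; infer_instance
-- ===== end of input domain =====

-- B replaces Horner's forward accumulator with a reversed pass carrying an explicit power-of-5 weight (alternative decomposition, same cost).


-- ===== PORT A =====
def to_scalar (state : List Int) : Int :=
  match PySem.List.min? state (fun y => y) with
  | none => 0  -- unreachable under Pre_ (Python raises ValueError on empty state)
  | some m =>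
    if m = 0 then 0
    else
      (PySem.List.pyRange 1 (state.length : Int) 1).foldl
        (fun acc i => acc * 5 + PySem.List.pyGetD state i 0)
        ((PySem.List.pyGet? state 0).getD 0)

-- ===== PORT B =====
def to_scalar_alt (state : List Int) : Int :=
  match PySem.List.min? state (fun y => y) with
  | none => 0  -- unreachable under Pre_ (Python raises ValueError on empty state)
  | some m =>
    if m = 0 then 0
    else
      (state.reverse.foldl (fun (p : Int × Int) d => (p.1 + d * p.2, p.2 * 5)) (0, 1)).1

-- ===== PRECONDITION & SPEC =====
-- Pre_ excludes only the empty list, on which Python's min raises ValueError (both A and B raise there).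
def Pre_to_scalar (state : List Int) : Prop := state ≠ []
instance (state : List Int) : Decidable (Pre_to_scalar state) := by unfold Pre_to_scalar; infer_instance
def pvWitness_to_scalar : List Int := [1, 2]
def Spec_to_scalar (state : List Int) (out : Int) : Prop := out = to_scalar_alt state
instance (state : List Int) (out : Int) : Decidable (Spec_to_scalar state out) := by unfold Spec_to_scalar; infer_instance

-- ===== CLAIM (what is proved, stated in full; the proofs are below) =====
def Claim_equal_to_scalar : Prop := ∀ (state : List Int), Dom_to_scalar state → Pre_to_scalar state → Spec_to_scalar state (to_scalar state)

-- ===== LEMMAS AND PROOFS =====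

-- shifting the initial Horner accumulator
theorem horner_shift (l : List Int) (x : Int) :
    l.foldl (fun a d => a * 5 + d) x
      = x * 5 ^ l.length + l.foldl (fun a d => a * 5 + d) 0 := by
  induction l generalizing x with
  | nil => simp
  | cons d l ih =>
      simp only [List.foldl_cons, List.length_cons]
      rw [ih (x * 5 + d), ih (0 * 5 + d)]
      ring

-- the reversed weighted-sum fold computes Horner's value
theorem rev_fold_eq (l : List Int) (t w : Int) :
    l.reverse.foldl (fun (p : Int × Int) d => (p.1 + d * p.2, p.2 * 5)) (t, w)
      = (t + w * l.foldl (fun a d => a * 5 + d) 0, w * 5 ^ l.length) := by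
  induction l generalizing t w with
  | nil => simp
  | cons d l ih =>
      simp only [List.reverse_cons, List.foldl_append, List.foldl_cons, List.foldl_nil,
        List.length_cons, ih]
      rw [horner_shift l (0 * 5 + d)]
      exact Prod.ext (by ring) (by ring)

-- ===== VERDICT (by name: the statement is the Claim_ definition above) =====
theorem to_scalar_spec : Claim_equal_to_scalar := by
  intro state _ hpre
  unfold Spec_to_scalar to_scalar to_scalar_alt
  cases state with
  | nil => exact absurd rfl hpre
  | cons x xs =>
      cases hmin : PySem.List.min? (x :: xs) (fun y => y) with
      | none => exact absurd ((PySem.List.min?_eq_none_iff _ _).mp hmin) (by simp)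
      | some m =>
          by_cases hm : m = 0
          · simp [hm]
          · simp only [if_neg hm]
            rw [PySem.List.foldl_pyRange_pyGetD' (x :: xs) 0
                  (fun acc d => acc * 5 + d) ((PySem.List.pyGet? (x :: xs) 0).getD 0)
                  (by norm_num : (0:Int) ≤ 1),
                rev_fold_eq]
            simp [PySem.List.pyGet?, PySem.List.pyIdx?, List.foldl_cons]
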